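-- pv_equiv track=rewrite | github.com/zheki4sh05/Tg-bot-budget-accounting | Lab_2/task2.py | count_numbers_and_alfa
-- ===== SOURCE A (Python) =====
-- def count_numbers_and_alfa(data):
--     str_list = list(' '.join([str(item) for item in data]))
--     numbers = ''
--     counter_numb = 0
--     counter_alfa = 0
--     str_list.append('')
--     for char in str_list:
--         if char.isdigit():
--             numbers += char
--         if char != ' ' and not char.isdigit() and len(numbers) != 0:
--             counter_numb += 1
--             counter_alfa += 1
--             numbers = ''
--     return counter_numb, counter_alfa
-- ===== SOURCE B (Python) =====
-- def count_numbers_and_alfa(data):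
--     # Partition the joined string at separator characters (anything that is
--     # neither a digit nor a space), then count the parts that contain a digit.
--     s = ' '.join(str(item) for item in data)
--     parts = ''.join(c if c.isdigit() or c == ' ' else '\n' for c in s).split('\n')
--     n = sum(1 for part in parts if any(c.isdigit() for c in part))
--     return n, n
-- ===== Notes on version B (the rewrite author's own statement) =====
-- stated objective: alternative
-- what changed: Replaces A's per-character accumulator state machine (collect digits, flush and count at each non-digit non-space char) with a partition pass: map every separator character of the joined string to a newline, split on it, and count the parts that contain a digit.
import Mathlib
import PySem

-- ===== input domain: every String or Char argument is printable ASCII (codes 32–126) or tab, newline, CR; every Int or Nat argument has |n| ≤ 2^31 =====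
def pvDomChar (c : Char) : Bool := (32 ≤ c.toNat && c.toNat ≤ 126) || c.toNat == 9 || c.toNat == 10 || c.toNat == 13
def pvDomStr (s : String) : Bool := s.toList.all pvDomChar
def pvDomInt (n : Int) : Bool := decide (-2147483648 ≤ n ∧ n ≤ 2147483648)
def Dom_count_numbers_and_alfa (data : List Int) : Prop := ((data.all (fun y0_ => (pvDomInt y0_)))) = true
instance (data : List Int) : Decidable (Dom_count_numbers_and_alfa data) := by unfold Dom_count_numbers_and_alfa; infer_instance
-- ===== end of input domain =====

-- B replaces A's per-character accumulator state machine with a partition pass: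
-- map separator characters to '\n', split, and count the parts containing a digit
-- (objective: alternative decomposition, same cost).


-- ===== PORT A =====
-- loop body of A: numbers-accumulator state machine over one character
def pvStepA (st : List Char × Int × Int) (c : Char) : List Char × Int × Int :=
  let numbers := if PySem.Chars.isdigit c then st.1 ++ [c] else st.1
  if c ≠ ' ' ∧ PySem.Chars.isdigit c = false ∧ numbers.length ≠ 0 then
    ([], st.2.1 + 1, st.2.2 + 1)
  else (numbers, st.2.1, st.2.2)

def count_numbers_and_alfa (data : List Int) : Int × Int :=
  let str_list := (PySem.Str.join " " (data.map PySem.Int.toStr)).toList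
  let st := str_list.foldl pvStepA ([], 0, 0)
  -- the appended '' element: ''.isdigit() is False and '' != ' ', so its loop
  -- iteration is exactly a final flush of the numbers accumulator (exact)
  if st.1.length ≠ 0 then (st.2.1 + 1, st.2.2 + 1) else (st.2.1, st.2.2)

-- ===== PORT B =====
-- the character map of Source B's inner join: keep digits and spaces, separators become '\n'
def pvMapCh (c : Char) : Char :=
  if PySem.Chars.isdigit c || c = ' ' then c else '\n'

def count_numbers_and_alfa_alt (data : List Int) : Int × Int :=
  let s := (PySem.Str.join " " (data.map PySem.Int.toStr)).toList
  let parts := PySem.Chars.splitOn (s.map pvMapCh) ['\n']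
  let n : Int := ((parts.filter (fun part => part.any PySem.Chars.isdigit)).length : Int)
  (n, n)

-- ===== PRECONDITION & SPEC =====
def Spec_count_numbers_and_alfa (data : List Int) (out : Int × Int) : Prop := out = count_numbers_and_alfa_alt data
instance (data : List Int) (out : Int × Int) : Decidable (Spec_count_numbers_and_alfa data out) := by unfold Spec_count_numbers_and_alfa; infer_instance

-- ===== CLAIM (what is proved, stated in full; the proofs are below) =====
def Claim_equal_count_numbers_and_alfa : Prop := ∀ (data : List Int), Dom_count_numbers_and_alfa data → Spec_count_numbers_and_alfa data (count_numbers_and_alfa data)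

-- ===== LEMMAS AND PROOFS =====

-- ---- digit strings of integers ----

lemma pv_digitChar_isdigit (m : Nat) (h : m < 10) : PySem.Chars.isdigit (Nat.digitChar m) = true := by
  interval_cases m <;> decide

lemma pv_toDigitsCore_all (fuel n : Nat) (ds : List Char)
    (hds : ∀ c ∈ ds, PySem.Chars.isdigit c = true) :
    ∀ c ∈ Nat.toDigitsCore 10 fuel n ds, PySem.Chars.isdigit c = true := by
  induction fuel generalizing n ds with
  | zero => simpa [Nat.toDigitsCore] using hds
  | succ fuel ih =>
    intro c hc
    simp only [Nat.toDigitsCore] at hc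
    split at hc
    · rcases List.mem_cons.mp hc with h | h
      · subst h; exact pv_digitChar_isdigit _ (Nat.mod_lt _ (by norm_num))
      · exact hds _ h
    · refine ih _ _ ?_ _ hc
      intro c' hc'
      rcases List.mem_cons.mp hc' with h | h
      · subst h; exact pv_digitChar_isdigit _ (Nat.mod_lt _ (by norm_num))
      · exact hds _ h

lemma pv_toDigitsCore_ne_nil (fuel n : Nat) (ds : List Char) (h : ds ≠ []) :
    Nat.toDigitsCore 10 fuel n ds ≠ [] := by
  induction fuel generalizing n ds with
  | zero => simpa [Nat.toDigitsCore]
  | succ fuel ih =>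
    simp only [Nat.toDigitsCore]
    split
    · simp
    · exact ih _ _ (by simp)

lemma pv_toDigits_all (n : Nat) : ∀ c ∈ Nat.toDigits 10 n, PySem.Chars.isdigit c = true :=
  pv_toDigitsCore_all _ _ _ (by simp)

lemma pv_toDigits_ne_nil (n : Nat) : Nat.toDigits 10 n ≠ [] := by
  unfold Nat.toDigits
  simp only [Nat.toDigitsCore]
  split
  · simp
  · exact pv_toDigitsCore_ne_nil _ _ _ (by simp)

-- ---- A's side: the fold over the joined string ----

lemma pv_fold_digits (l : List Char) (hl : ∀ c ∈ l, PySem.Chars.isdigit c = true)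
    (nm : List Char) (cn ca : Int) :
    l.foldl pvStepA (nm, cn, ca) = (nm ++ l, cn, ca) := by
  induction l generalizing nm with
  | nil => simp
  | cons c l ih =>
    have hc : PySem.Chars.isdigit c = true := hl c (by simp)
    have : pvStepA (nm, cn, ca) c = (nm ++ [c], cn, ca) := by
      simp [pvStepA, hc]
    rw [List.foldl_cons, this, ih (fun c' h => hl c' (by simp [h]))]
    simp

lemma pv_fold_head (x : Int) (cn ca : Int) :
    ∃ ds : List Char, ds ≠ [] ∧
      (PySem.Int.toChars x).foldl pvStepA ([], cn, ca) = (ds, cn, ca) := by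
  unfold PySem.Int.toChars
  by_cases hx : x < 0
  · refine ⟨Nat.toDigits 10 x.natAbs, pv_toDigits_ne_nil _, ?_⟩
    have hminus : pvStepA ([], cn, ca) '-' = ([], cn, ca) := by
      simp [pvStepA, show PySem.Chars.isdigit '-' = false by decide]
    rw [if_pos hx, List.foldl_cons, hminus]
    simpa using pv_fold_digits _ (pv_toDigits_all _) [] cn ca
  · refine ⟨Nat.toDigits 10 x.toNat, pv_toDigits_ne_nil _, ?_⟩
    rw [if_neg hx]
    simpa using pv_fold_digits _ (pv_toDigits_all _) [] cn ca

lemma pv_fold_tail_item (y : Int) (nm : List Char) (h : nm ≠ []) (cn ca : Int) :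
    ∃ ds : List Char, ds ≠ [] ∧
      (' ' :: PySem.Int.toChars y).foldl pvStepA (nm, cn, ca) =
        (ds, cn + (if y < 0 then 1 else 0), ca + (if y < 0 then 1 else 0)) := by
  have hsp : pvStepA (nm, cn, ca) ' ' = (nm, cn, ca) := by
    simp [pvStepA, show PySem.Chars.isdigit ' ' = false by decide]
  rw [List.foldl_cons, hsp]
  unfold PySem.Int.toChars
  by_cases hy : y < 0
  · refine ⟨Nat.toDigits 10 y.natAbs, pv_toDigits_ne_nil _, ?_⟩
    have hminus : pvStepA (nm, cn, ca) '-' = ([], cn + 1, ca + 1) := by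
      simp [pvStepA, show PySem.Chars.isdigit '-' = false by decide,
        List.length_eq_zero_iff, h]
    rw [if_pos hy, List.foldl_cons, hminus]
    simp [hy, pv_fold_digits _ (pv_toDigits_all _) [] (cn + 1) (ca + 1)]
  · refine ⟨nm ++ Nat.toDigits 10 y.toNat, by simp [h], ?_⟩
    rw [if_neg hy]
    simp [hy, pv_fold_digits _ (pv_toDigits_all _) nm cn ca]

lemma pv_fold_tail (ys : List Int) (nm : List Char) (h : nm ≠ []) (cn ca : Int) :
    ∃ ds : List Char, ds ≠ [] ∧
      ((ys.map (fun y => ' ' :: PySem.Int.toChars y)).flatten).foldl pvStepA (nm, cn, ca) =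
        (ds, cn + ((ys.filter (fun x => decide (x < 0))).length : Int),
             ca + ((ys.filter (fun x => decide (x < 0))).length : Int)) := by
  induction ys generalizing nm cn ca with
  | nil => exact ⟨nm, h, by simp⟩
  | cons y ys ih =>
    obtain ⟨ds, hds, hfold⟩ := pv_fold_tail_item y nm h cn ca
    obtain ⟨ds', hds', hfold'⟩ := ih ds hds
      (cn + (if y < 0 then 1 else 0)) (ca + (if y < 0 then 1 else 0))
    refine ⟨ds', hds', ?_⟩
    rw [List.map_cons, List.flatten_cons, List.foldl_append, hfold, hfold']
    by_cases hy : y < 0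
    · simp only [List.filter_cons, hy, decide_true, if_true, List.length_cons]
      simp only [Prod.mk.injEq]
      refine ⟨by simp, ?_, ?_⟩ <;> push_cast <;> ring
    · simp only [List.filter_cons, hy, decide_false]
      simp only [Prod.mk.injEq]
      refine ⟨by simp, ?_, ?_⟩ <;> push_cast <;> ring

lemma pv_join_decomp (x : Int) (xs : List Int) :
    PySem.Chars.join [' '] ((x :: xs).map PySem.Int.toChars) =
      PySem.Int.toChars x ++ ((xs.map (fun y => ' ' :: PySem.Int.toChars y)).flatten) := by
  induction xs generalizing x with
  | nil => simp [PySem.Chars.join_singleton]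
  | cons y ys ih =>
    rw [List.map_cons, List.map_cons, PySem.Chars.join_cons_cons, ← List.map_cons, ih y]
    simp

lemma pv_A_closed (x : Int) (xs : List Int) :
    count_numbers_and_alfa (x :: xs) =
      (1 + ((xs.filter (fun x => decide (x < 0))).length : Int),
       1 + ((xs.filter (fun x => decide (x < 0))).length : Int)) := by
  unfold count_numbers_and_alfa
  have hjoin : (PySem.Str.join " " ((x :: xs).map PySem.Int.toStr)).toList =
      PySem.Int.toChars x ++ ((xs.map (fun y => ' ' :: PySem.Int.toChars y)).flatten) := by
    rw [PySem.Str.toList_join]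
    simpa [PySem.Int.toList_toStr, List.map_map, Function.comp_def] using pv_join_decomp x xs
  obtain ⟨ds, hds, hhead⟩ := pv_fold_head x 0 0
  obtain ⟨ds', hds', htail⟩ := pv_fold_tail xs ds hds 0 0
  simp only [hjoin, List.foldl_append, hhead, htail]
  rw [if_pos (by simpa [List.length_eq_zero_iff] using hds' : ds'.length ≠ 0)]
  simp only [Prod.mk.injEq]
  constructor <;> ring

-- ---- B's side: splitting the mapped string ----

-- pure recursive split of a character list at '\n'
def pvSplit : List Char → List (List Char)
  | [] => [[]]
  | c :: rest =>
    if c = '\n' then [] :: pvSplit rest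
    else
      match pvSplit rest with
      | [] => [[c]]
      | h :: t => (c :: h) :: t

lemma pv_pvSplit_ne_nil (l : List Char) : pvSplit l ≠ [] := by
  cases l with
  | nil => simp [pvSplit]
  | cons c rest =>
    simp only [pvSplit]
    split
    · simp
    · split <;> simp

lemma pv_pvSplit_nl (l : List Char) : pvSplit ('\n' :: l) = [] :: pvSplit l := by
  simp [pvSplit]

lemma pv_pvSplit_cons (c : Char) (l : List Char) (hc : c ≠ '\n')
    (h : List Char) (t : List (List Char)) (hl : pvSplit l = h :: t) :
    pvSplit (c :: l) = (c :: h) :: t := by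
  simp only [pvSplit, hc, if_false, hl]

lemma pv_splitOn_go (fuel : Nat) :
    ∀ (l cur : List Char) (acc : List (List Char)), l.length < fuel →
      PySem.Chars.splitOn.go ['\n'] fuel l cur acc =
        acc.reverse ++
          (match pvSplit l with
           | [] => []
           | h :: t => (cur.reverse ++ h) :: t) := by
  induction fuel with
  | zero => intro l cur acc h; omega
  | succ fuel ih =>
    intro l cur acc h
    cases l with
    | nil =>
      rw [PySem.Chars.splitOn.go]
      simp [pvSplit]
      omega
    | cons c rest =>
      by_cases hc : c = '\n'
      · subst hc
        have hpre : List.isPrefixOf ['\n'] ('\n' :: rest) = true := by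
          simp [List.isPrefixOf]
        rw [PySem.Chars.splitOn.go]
        simp only [hpre, if_true]
        rw [ih _ _ _ (by simpa using Nat.lt_of_succ_lt_succ h)]
        rcases hsp : pvSplit rest with _ | ⟨h', t'⟩
        · exact absurd hsp (pv_pvSplit_ne_nil rest)
        · simp [pv_pvSplit_nl, hsp]
      · have hpre : List.isPrefixOf ['\n'] (c :: rest) = false := by
          simp only [List.isPrefixOf, Bool.and_true]
          exact beq_false_of_ne (fun h => hc h.symm)
        rw [PySem.Chars.splitOn.go]
        simp only [hpre, Bool.false_eq_true, if_false]
        rw [ih _ _ _ (by simpa using Nat.lt_of_succ_lt_succ h)]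
        rcases hsp : pvSplit rest with _ | ⟨h', t'⟩
        · exact absurd hsp (pv_pvSplit_ne_nil rest)
        · simp [pv_pvSplit_cons c rest hc h' t' hsp]

lemma pv_splitOn_newline (l : List Char) :
    PySem.Chars.splitOn l ['\n'] = pvSplit l := by
  unfold PySem.Chars.splitOn
  rw [pv_splitOn_go (l.length + 1) l [] [] (by omega)]
  rcases hsp : pvSplit l with _ | ⟨h, t⟩
  · exact absurd hsp (pv_pvSplit_ne_nil l)
  · simp

lemma pv_pvSplit_append (p rest : List Char) (hp : ∀ c ∈ p, c ≠ '\n')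
    (h : List Char) (t : List (List Char)) (hrest : pvSplit rest = h :: t) :
    pvSplit (p ++ rest) = (p ++ h) :: t := by
  induction p with
  | nil => simpa using hrest
  | cons c p ihp =>
    have hc : c ≠ '\n' := hp c (by simp)
    have := ihp (fun c' h' => hp c' (by simp [h']))
    simp only [List.cons_append, pvSplit, hc, if_false, this]

-- digit characters and spaces are fixed by pvMapCh; digits are not '\n'
lemma pv_mapCh_digits (l : List Char) (hl : ∀ c ∈ l, PySem.Chars.isdigit c = true) :
    l.map pvMapCh = l := by
  induction l with
  | nil => rfl
  | cons c l ih =>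
    simp only [List.map_cons, pvMapCh, hl c (by simp), Bool.true_or, if_true,
      ih (fun c' h' => hl c' (by simp [h']))]

lemma pv_mapCh_space : pvMapCh ' ' = ' ' := by decide

lemma pv_digit_ne_nl (c : Char) (hc : PySem.Chars.isdigit c = true) : c ≠ '\n' := by
  intro h; subst h; simp [PySem.Chars.isdigit] at hc

-- the mapped characters of str(y): '\n' followed by digits if y < 0, else digits
lemma pv_mstr (y : Int) :
    ∃ ds : List Char, ds ≠ [] ∧ (∀ c ∈ ds, PySem.Chars.isdigit c = true) ∧
      (PySem.Int.toChars y).map pvMapCh = (if y < 0 then '\n' :: ds else ds) := by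
  unfold PySem.Int.toChars
  by_cases hy : y < 0
  · refine ⟨Nat.toDigits 10 y.natAbs, pv_toDigits_ne_nil _, pv_toDigits_all _, ?_⟩
    rw [if_pos hy, if_pos hy]
    simp [pvMapCh, pv_mapCh_digits _ (pv_toDigits_all _),
      show PySem.Chars.isdigit '-' = false by decide]
  · refine ⟨Nat.toDigits 10 y.toNat, pv_toDigits_ne_nil _, pv_toDigits_all _, ?_⟩
    rw [if_neg hy, if_neg hy]
    exact pv_mapCh_digits _ (pv_toDigits_all _)

-- splitting the mapped tail: head part has a digit iff the first item is nonnegative,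
-- and the remaining parts contain exactly one digit part per negative item
lemma pv_split_tail (ys : List Int) :
    ∃ (h : List Char) (t : List (List Char)),
      pvSplit (((ys.map (fun y => ' ' :: PySem.Int.toChars y)).flatten).map pvMapCh) = h :: t ∧
      (t.filter (fun part => part.any PySem.Chars.isdigit)).length =
        (ys.filter (fun x => decide (x < 0))).length ∧
      h.any PySem.Chars.isdigit = (match ys with | [] => false | y :: _ => decide (0 ≤ y)) := by
  induction ys with
  | nil => exact ⟨[], [], by simp [pvSplit], by simp, by simp⟩
  | cons y ys ih =>
    obtain ⟨h, t, hsp, hcount, hhead⟩ := ih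
    obtain ⟨ds, hne, hdig, hm⟩ := pv_mstr y
    have hdsne : ∀ c ∈ ds, c ≠ '\n' := fun c hc => pv_digit_ne_nl c (hdig c hc)
    have hany : ∀ (l : List Char), (ds ++ l).any PySem.Chars.isdigit = true := by
      intro l
      rcases ds with _ | ⟨d, ds'⟩
      · exact absurd rfl hne
      · simp [hdig d (by simp)]
    have h1 : pvSplit (ds ++ ((ys.map (fun y => ' ' :: PySem.Int.toChars y)).flatten).map pvMapCh)
        = (ds ++ h) :: t := pv_pvSplit_append ds _ hdsne h t hsp
    rw [List.map_cons, List.flatten_cons, List.map_append, List.map_cons, pv_mapCh_space, hm]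
    by_cases hy : y < 0
    · rw [if_pos hy]
      refine ⟨[' '], (ds ++ h) :: t, ?_, ?_, ?_⟩
      · rw [List.cons_append]
        exact pv_pvSplit_cons ' ' _ (by decide) [] _
          (by rw [List.cons_append, pv_pvSplit_nl, h1])
      · simp only [List.filter_cons, hany h, if_true, List.length_cons, hcount,
          hy, decide_true]
      · simp [show PySem.Chars.isdigit ' ' = false by decide,
          show ¬(0 ≤ y) by omega]
    · rw [if_neg hy]
      refine ⟨' ' :: (ds ++ h), t, ?_, ?_, ?_⟩
      · rw [List.cons_append]
        exact pv_pvSplit_cons ' ' _ (by decide) _ _ h1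
      · simpa [List.filter_cons, hy] using hcount
      · simp [hany h, show (0 ≤ y) by omega]

lemma pv_B_closed (x : Int) (xs : List Int) :
    count_numbers_and_alfa_alt (x :: xs) =
      (1 + ((xs.filter (fun x => decide (x < 0))).length : Int),
       1 + ((xs.filter (fun x => decide (x < 0))).length : Int)) := by
  unfold count_numbers_and_alfa_alt
  have hjoin : (PySem.Str.join " " ((x :: xs).map PySem.Int.toStr)).toList =
      PySem.Int.toChars x ++ ((xs.map (fun y => ' ' :: PySem.Int.toChars y)).flatten) := by
    rw [PySem.Str.toList_join]
    simpa [PySem.Int.toList_toStr, List.map_map, Function.comp_def] using pv_join_decomp x xs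
  obtain ⟨h, t, hsp, hcount, _⟩ := pv_split_tail xs
  obtain ⟨ds, hne, hdig, hm⟩ := pv_mstr x
  have hdsne : ∀ c ∈ ds, c ≠ '\n' := fun c hc => pv_digit_ne_nl c (hdig c hc)
  have hany : (ds ++ h).any PySem.Chars.isdigit = true := by
    rcases ds with _ | ⟨d, ds'⟩
    · exact absurd rfl hne
    · simp [hdig d (by simp)]
  have h1 : pvSplit (ds ++ ((xs.map (fun y => ' ' :: PySem.Int.toChars y)).flatten).map pvMapCh)
      = (ds ++ h) :: t := pv_pvSplit_append ds _ hdsne h t hsp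
  simp only [hjoin]
  rw [List.map_append, hm, pv_splitOn_newline]
  by_cases hx : x < 0
  · rw [if_pos hx, List.cons_append, pv_pvSplit_nl, h1]
    simp only [List.filter_cons, hany, if_true,
      show (([] : List Char).any PySem.Chars.isdigit) = false by decide,
      Bool.false_eq_true, if_false, List.length_cons, hcount, Prod.mk.injEq]
    constructor <;> push_cast <;> ring
  · rw [if_neg hx, h1]
    simp only [List.filter_cons, hany, if_true, List.length_cons, hcount, Prod.mk.injEq]
    constructor <;> push_cast <;> ring

-- ===== VERDICT (by name: the statement is the Claim_ definition above) =====
theorem count_numbers_and_alfa_spec : Claim_equal_count_numbers_and_alfa := by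
  intro data _
  unfold Spec_count_numbers_and_alfa
  match data with
  | [] =>
    simp [count_numbers_and_alfa, count_numbers_and_alfa_alt, PySem.Str.join,
      pv_splitOn_newline, pvSplit]
  | x :: xs => rw [pv_A_closed, pv_B_closed]
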